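-- pv_equiv track=rewrite | github.com/xmutantson/mercury | tools/mercury_benchmark.py | parse_config_spec
-- ===== SOURCE A (Python) =====
-- CONFIG_PRESETS = {
--     'nb-mfsk': 'nb:100,nb:101,nb:102',
--     'wb-mfsk': 'wb:100,wb:101,wb:102',
--     'nb-ofdm': ','.join(f'nb:{i}' for i in range(17)),
--     'wb-ofdm': ','.join(f'wb:{i}' for i in range(17)),
--     'all-nb': 'nb:100,nb:101,nb:102,' + ','.join(f'nb:{i}' for i in range(17)),
--     'all-wb': 'wb:100,wb:101,wb:102,' + ','.join(f'wb:{i}' for i in range(17)),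
-- }
--
-- def parse_config_spec(spec_str, default_nb=False):
--     """Parse config specs like 'nb:100,wb:101,0' into list of (config_id, is_nb).
--
--     Supports presets: 'nb-mfsk', 'wb-mfsk', 'nb-ofdm', 'wb-ofdm', 'all-nb', 'all-wb'
--     Combine with commas: 'nb-mfsk,wb-mfsk,nb-ofdm'
--     Without prefix, inherits default_nb from --narrowband flag.
--     """
--     parts = spec_str.split(',')
--     expanded = []
--     for p in parts:
--         p = p.strip()
--         if p in CONFIG_PRESETS:
--             expanded.extend(CONFIG_PRESETS[p].split(','))
--         else:
--             expanded.append(p)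
--
--     specs = []
--     for s in expanded:
--         s = s.strip()
--         if not s:
--             continue
--         if s.startswith('nb:'):
--             specs.append((int(s[3:]), True))
--         elif s.startswith('wb:'):
--             specs.append((int(s[3:]), False))
--         else:
--             specs.append((int(s), default_nb))
--     return specs
-- ===== SOURCE B (Python) =====
-- CONFIG_PRESETS = {
--     'nb-mfsk': 'nb:100,nb:101,nb:102',
--     'wb-mfsk': 'wb:100,wb:101,wb:102',
--     'nb-ofdm': ','.join(f'nb:{i}' for i in range(17)),
--     'wb-ofdm': ','.join(f'wb:{i}' for i in range(17)),
--     'all-nb': 'nb:100,nb:101,nb:102,' + ','.join(f'nb:{i}' for i in range(17)),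
--     'all-wb': 'wb:100,wb:101,wb:102,' + ','.join(f'wb:{i}' for i in range(17)),
-- }
--
-- # Preset contents pre-parsed ONCE at import into (config_id, is_nb) pair lists:
-- # at call time a preset is a direct table lookup, never re-split and re-parsed.
-- PRESET_SPECS = {
--     'nb-mfsk': [(100, True), (101, True), (102, True)],
--     'wb-mfsk': [(100, False), (101, False), (102, False)],
--     'nb-ofdm': [(i, True) for i in range(17)],
--     'wb-ofdm': [(i, False) for i in range(17)],
--     'all-nb': [(100, True), (101, True), (102, True)] + [(i, True) for i in range(17)],
--     'all-wb': [(100, False), (101, False), (102, False)] + [(i, False) for i in range(17)],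
-- }
--
-- def parse_config_spec(spec_str, default_nb=False):
--     """Single loop over spec_str.split(','); presets come pre-parsed from PRESET_SPECS."""
--     specs = []
--     for part in spec_str.split(','):
--         t = part.strip()
--         preset = PRESET_SPECS.get(t)
--         if preset is not None:
--             specs.extend(preset)
--         elif t:
--             if t.startswith('nb:'):
--                 specs.append((int(t[3:]), True))
--             elif t.startswith('wb:'):
--                 specs.append((int(t[3:]), False))
--             else:
--                 specs.append((int(t), default_nb))
--     return specs
-- ===== Notes on version B (the rewrite author's own statement) =====
-- stated objective: alternative
-- what changed: Replaces A's string-valued preset table plus two passes (expand into an intermediate token list, then split/strip/int-parse every token) with a table of pre-parsed (id, is_nb) pair lists built once at import and a single loop that appends preset pair lists directly, never re-splitting or re-parsing preset contents.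
import Mathlib
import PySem

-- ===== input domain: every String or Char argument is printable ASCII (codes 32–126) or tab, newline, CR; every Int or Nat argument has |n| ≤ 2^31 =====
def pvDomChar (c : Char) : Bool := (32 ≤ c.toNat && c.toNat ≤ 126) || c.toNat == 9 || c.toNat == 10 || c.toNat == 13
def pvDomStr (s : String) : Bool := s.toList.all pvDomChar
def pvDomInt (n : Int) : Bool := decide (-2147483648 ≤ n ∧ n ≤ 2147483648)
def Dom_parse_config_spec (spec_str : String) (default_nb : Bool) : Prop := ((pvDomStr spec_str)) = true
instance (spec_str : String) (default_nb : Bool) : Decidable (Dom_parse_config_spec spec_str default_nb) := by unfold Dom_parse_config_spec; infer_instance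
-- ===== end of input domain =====

-- B replaces A's string-valued preset table + two passes (expand to a token list, then
-- parse every token) by a table of PRE-PARSED (id, is_nb) pair lists built once at
-- import, so at call time presets are appended directly and never re-split or
-- re-parsed; objective: alternative (different data structure, same asymptotic cost).

-- module-level constant CONFIG_PRESETS (the computed entries written out as the
-- literal strings they evaluate to at import time)
def CONFIG_PRESETS : PySem.Dict String String := PySem.Dict.ofList
  [ ("nb-mfsk", "nb:100,nb:101,nb:102"),
    ("wb-mfsk", "wb:100,wb:101,wb:102"),
    ("nb-ofdm", "nb:0,nb:1,nb:2,nb:3,nb:4,nb:5,nb:6,nb:7,nb:8,nb:9,nb:10,nb:11,nb:12,nb:13,nb:14,nb:15,nb:16"),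
    ("wb-ofdm", "wb:0,wb:1,wb:2,wb:3,wb:4,wb:5,wb:6,wb:7,wb:8,wb:9,wb:10,wb:11,wb:12,wb:13,wb:14,wb:15,wb:16"),
    ("all-nb", "nb:100,nb:101,nb:102,nb:0,nb:1,nb:2,nb:3,nb:4,nb:5,nb:6,nb:7,nb:8,nb:9,nb:10,nb:11,nb:12,nb:13,nb:14,nb:15,nb:16"),
    ("all-wb", "wb:100,wb:101,wb:102,wb:0,wb:1,wb:2,wb:3,wb:4,wb:5,wb:6,wb:7,wb:8,wb:9,wb:10,wb:11,wb:12,wb:13,wb:14,wb:15,wb:16") ]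

-- s.split(',') — separator is the non-empty literal ',', so split? is always some
def pcsSplit (s : String) : List String := (PySem.Str.split? s ",").getD []

-- ===== PORT A =====
-- body of A's first loop (expansion)
def pcsExpandStep (acc : List String) (p : String) : List String :=
  let q := PySem.Str.strip p
  if CONFIG_PRESETS.contains q then acc ++ pcsSplit (CONFIG_PRESETS.getD q "")
  else acc ++ [q]

-- body of A's second loop (parsing); int() ports to ofStr? with getD 0: the none case
-- is Python's ValueError, excluded by Pre_parse_config_spec
def pcsParseStep (default_nb : Bool) (specs : List (Int × Bool)) (s : String) : List (Int × Bool) :=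
  let t := PySem.Str.strip s
  if t = "" then specs
  else if PySem.Str.startswith t "nb:" then
    specs ++ [((PySem.Int.ofStr? (PySem.Str.slice t (some 3) none)).getD 0, true)]
  else if PySem.Str.startswith t "wb:" then
    specs ++ [((PySem.Int.ofStr? (PySem.Str.slice t (some 3) none)).getD 0, false)]
  else specs ++ [((PySem.Int.ofStr? t).getD 0, default_nb)]

def parse_config_spec (spec_str : String) (default_nb : Bool) : List (Int × Bool) :=
  let parts := pcsSplit spec_str
  let expanded := parts.foldl pcsExpandStep []
  expanded.foldl (pcsParseStep default_nb) []

-- ===== PORT B =====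
-- module-level constant PRESET_SPECS: the presets pre-parsed once into pair lists
-- (the range(17) comprehensions ported as maps over pyRange)
def PRESET_SPECS : PySem.Dict String (List (Int × Bool)) := PySem.Dict.ofList
  [ ("nb-mfsk", [(100, true), (101, true), (102, true)]),
    ("wb-mfsk", [(100, false), (101, false), (102, false)]),
    ("nb-ofdm", (PySem.List.pyRange 0 17 1).map (fun i => (i, true))),
    ("wb-ofdm", (PySem.List.pyRange 0 17 1).map (fun i => (i, false))),
    ("all-nb", [(100, true), (101, true), (102, true)] ++ (PySem.List.pyRange 0 17 1).map (fun i => (i, true))),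
    ("all-wb", [(100, false), (101, false), (102, false)] ++ (PySem.List.pyRange 0 17 1).map (fun i => (i, false))) ]

-- body of B's single loop
def pcsAltStep (default_nb : Bool) (specs : List (Int × Bool)) (part : String) : List (Int × Bool) :=
  let t := PySem.Str.strip part
  match PRESET_SPECS.get? t with
  | some preset => specs ++ preset
  | none =>
    if t = "" then specs
    else if PySem.Str.startswith t "nb:" then
      specs ++ [((PySem.Int.ofStr? (PySem.Str.slice t (some 3) none)).getD 0, true)]
    else if PySem.Str.startswith t "wb:" then
      specs ++ [((PySem.Int.ofStr? (PySem.Str.slice t (some 3) none)).getD 0, false)]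
    else specs ++ [((PySem.Int.ofStr? t).getD 0, default_nb)]

def parse_config_spec_alt (spec_str : String) (default_nb : Bool) : List (Int × Bool) :=
  (pcsSplit spec_str).foldl (pcsAltStep default_nb) []

-- ===== PRECONDITION & SPEC =====
-- a token raises no ValueError: empty after strip, or its id part parses as int
def pcsTokOk (s : String) : Bool :=
  let t := PySem.Str.strip s
  t = "" ||
    (if PySem.Str.startswith t "nb:" then (PySem.Int.ofStr? (PySem.Str.slice t (some 3) none)).isSome
     else if PySem.Str.startswith t "wb:" then (PySem.Int.ofStr? (PySem.Str.slice t (some 3) none)).isSome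
     else (PySem.Int.ofStr? t).isSome)

-- Pre_ excludes exactly the inputs where Python A raises ValueError: a non-preset,
-- non-empty token whose integer part int() cannot parse
def Pre_parse_config_spec (spec_str : String) (default_nb : Bool) : Prop :=
  ((pcsSplit spec_str).all
    (fun p => CONFIG_PRESETS.contains (PySem.Str.strip p) || pcsTokOk p)) = true
instance (spec_str : String) (default_nb : Bool) : Decidable (Pre_parse_config_spec spec_str default_nb) := by
  unfold Pre_parse_config_spec; infer_instance

def pvWitness_parse_config_spec : String × Bool := ("nb-mfsk, wb:7 ,5,", false)

def Spec_parse_config_spec (spec_str : String) (default_nb : Bool) (out : List (Int × Bool)) : Prop :=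
  out = parse_config_spec_alt spec_str default_nb
instance (spec_str : String) (default_nb : Bool) (out : List (Int × Bool)) : Decidable (Spec_parse_config_spec spec_str default_nb out) := by
  unfold Spec_parse_config_spec; infer_instance

-- ===== CLAIM (what is proved, stated in full; the proofs are below) =====
def Claim_equal_parse_config_spec : Prop := ∀ (spec_str : String) (default_nb : Bool), Dom_parse_config_spec spec_str default_nb → Pre_parse_config_spec spec_str default_nb → Spec_parse_config_spec spec_str default_nb (parse_config_spec spec_str default_nb)

-- ===== LEMMAS AND PROOFS =====

-- dropWhile leaves a head that fails the predicate
theorem pcs_dw_head {q : Char → Bool} {l t : List Char} {a : Char}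
    (h : List.dropWhile q l = a :: t) : q a = false := by
  induction l with
  | nil => simp [List.dropWhile] at h
  | cons x xs ih =>
    by_cases hx : q x
    · exact ih (by simpa [List.dropWhile, hx] using h)
    · simp [List.dropWhile, hx] at h
      simpa [h.1] using hx

theorem pcs_dw_idem (q : Char → Bool) (l : List Char) :
    List.dropWhile q (List.dropWhile q l) = List.dropWhile q l := by
  cases h : List.dropWhile q l with
  | nil => simp
  | cons a t => simp [List.dropWhile, pcs_dw_head h]

theorem pcs_strip_idem_chars (cs : List Char) :
    PySem.Chars.strip (PySem.Chars.strip cs) = PySem.Chars.strip cs := by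
  unfold PySem.Chars.strip PySem.Chars.rstrip PySem.Chars.lstrip
  set q := PySem.Chars.isspace with hq
  set X := List.dropWhile q cs with hX
  have hR : List.dropWhile q ((List.dropWhile q X.reverse).reverse) = (List.dropWhile q X.reverse).reverse := by
    cases h : (List.dropWhile q X.reverse).reverse with
    | nil => simp
    | cons a t =>
      have hpre : (List.dropWhile q X.reverse).reverse <+: X := by
        have : List.dropWhile q X.reverse <:+ X.reverse := List.dropWhile_suffix q
        simpa using List.reverse_prefix.mpr this
      rw [h] at hpre
      obtain ⟨z, hz⟩ := hpre
      have hXa : X = a :: (t ++ z) := by simpa using hz.symm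
      have : q a = false := pcs_dw_head (l := cs) (by rw [← hX, ← hXa])
      simp [List.dropWhile, this]
  rw [hR, List.reverse_reverse, pcs_dw_idem]

theorem pcs_strip_idem (s : String) :
    PySem.Str.strip (PySem.Str.strip s) = PySem.Str.strip s := by
  simp [PySem.Str.strip, pcs_strip_idem_chars]

-- what parsing ONE token appends (the chunk form of A's parse step)
def pcsTokChunk (d : Bool) (s : String) : List (Int × Bool) :=
  let t := PySem.Str.strip s
  if t = "" then []
  else if PySem.Str.startswith t "nb:" then
    [((PySem.Int.ofStr? (PySem.Str.slice t (some 3) none)).getD 0, true)]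
  else if PySem.Str.startswith t "wb:" then
    [((PySem.Int.ofStr? (PySem.Str.slice t (some 3) none)).getD 0, false)]
  else [((PySem.Int.ofStr? t).getD 0, d)]

theorem pcs_parseStep_chunk (d : Bool) (sp : List (Int × Bool)) (s : String) :
    pcsParseStep d sp s = sp ++ pcsTokChunk d s := by
  unfold pcsParseStep pcsTokChunk
  dsimp only
  split_ifs <;> simp

theorem pcs_parse_foldl (d : Bool) (l : List String) (sp : List (Int × Bool)) :
    l.foldl (pcsParseStep d) sp = sp ++ l.flatMap (pcsTokChunk d) := by
  induction l generalizing sp with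
  | nil => simp
  | cons s t ih => rw [List.foldl_cons, pcs_parseStep_chunk, ih]; simp

-- what B's step appends (the chunk form of B's step, at the stripped token)
def pcsAltChunk (d : Bool) (t : String) : List (Int × Bool) :=
  match PRESET_SPECS.get? t with
  | some preset => preset
  | none =>
    if t = "" then []
    else if PySem.Str.startswith t "nb:" then
      [((PySem.Int.ofStr? (PySem.Str.slice t (some 3) none)).getD 0, true)]
    else if PySem.Str.startswith t "wb:" then
      [((PySem.Int.ofStr? (PySem.Str.slice t (some 3) none)).getD 0, false)]
    else [((PySem.Int.ofStr? t).getD 0, d)]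

theorem pcs_altStep_chunk (d : Bool) (sp : List (Int × Bool)) (p : String) :
    pcsAltStep d sp p = sp ++ pcsAltChunk d (PySem.Str.strip p) := by
  unfold pcsAltStep pcsAltChunk
  dsimp only
  cases PRESET_SPECS.get? (PySem.Str.strip p) with
  | some preset => rfl
  | none => split_ifs <;> simp

-- the two tables have the same keys
theorem pcs_keysC : CONFIG_PRESETS.keys = ["nb-mfsk", "wb-mfsk", "nb-ofdm", "wb-ofdm", "all-nb", "all-wb"] := by
  decide

set_option maxRecDepth 8192 in
theorem pcs_keysP : PRESET_SPECS.keys = ["nb-mfsk", "wb-mfsk", "nb-ofdm", "wb-ofdm", "all-nb", "all-wb"] := by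
  decide

-- a non-preset token is absent from the pre-parsed table too
theorem pcs_get?_none (t : String) (hc : CONFIG_PRESETS.contains t = false) :
    PRESET_SPECS.get? t = none := by
  have h : PRESET_SPECS.contains t = false := by
    rw [PySem.Dict.contains_eq_decide_mem_keys, pcs_keysP]
    rw [PySem.Dict.contains_eq_decide_mem_keys, pcs_keysC] at hc
    exact hc
  rw [PySem.Dict.contains_eq_isSome_get?] at h
  exact Option.not_isSome_iff_eq_none.mp (by simp [h])

-- on each preset key, flat-parsing the CONFIG_PRESETS string gives exactly the
-- pre-parsed PRESET_SPECS list
set_option maxRecDepth 8192 in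
theorem pcs_tables_pos (t : String) (d : Bool) (hc : CONFIG_PRESETS.contains t = true) :
    pcsAltChunk d t = (pcsSplit (CONFIG_PRESETS.getD t "")).flatMap (pcsTokChunk d) := by
  rw [PySem.Dict.contains_eq_decide_mem_keys, pcs_keysC] at hc
  simp only [List.mem_cons, List.not_mem_nil, or_false, decide_eq_true_eq] at hc
  rcases hc with h | h | h | h | h | h <;> subst h <;> cases d <;> decide

-- chunk of an already-stripped token (inner strip is idempotent)
theorem pcs_tokChunk_strip (d : Bool) (s : String) :
    pcsTokChunk d (PySem.Str.strip s) = pcsTokChunk d s := by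
  unfold pcsTokChunk
  rw [pcs_strip_idem]

-- one A-part, expanded then parsed, appends exactly what B's step appends
theorem pcs_step (d : Bool) (sp : List (Int × Bool)) (p : String) :
    (pcsExpandStep [] p).foldl (pcsParseStep d) sp = pcsAltStep d sp p := by
  rw [pcs_altStep_chunk]
  unfold pcsExpandStep
  dsimp only
  by_cases hc : CONFIG_PRESETS.contains (PySem.Str.strip p)
  · rw [if_pos hc, pcs_parse_foldl, pcs_tables_pos _ d hc]
    simp
  · rw [if_neg hc, pcs_parse_foldl]
    have hn := pcs_get?_none (PySem.Str.strip p) (by simpa using hc)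
    have : pcsAltChunk d (PySem.Str.strip p) = pcsTokChunk d (PySem.Str.strip p) := by
      unfold pcsAltChunk pcsTokChunk
      rw [hn, pcs_strip_idem]
    rw [this]
    simp [pcs_tokChunk_strip]

-- A's expand step splits into a per-part chunk
theorem pcs_expandStep_split (acc : List String) (p : String) :
    pcsExpandStep acc p = acc ++ pcsExpandStep [] p := by
  unfold pcsExpandStep
  dsimp only
  split_ifs <;> simp

-- fusing A's two passes into B's single pass
theorem pcs_fuse (d : Bool) (parts : List String) (e : List String) (acc : List (Int × Bool)) :
    (parts.foldl pcsExpandStep e).foldl (pcsParseStep d) acc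
      = parts.foldl (pcsAltStep d) (e.foldl (pcsParseStep d) acc) := by
  induction parts generalizing e acc with
  | nil => rfl
  | cons p ps ih =>
    rw [List.foldl_cons, List.foldl_cons, ih, pcs_expandStep_split, List.foldl_append,
      pcs_step]

-- ===== VERDICT (by name: the statement is the Claim_ definition above) =====
theorem parse_config_spec_spec : Claim_equal_parse_config_spec := by
  intro spec_str default_nb _ _
  unfold Spec_parse_config_spec parse_config_spec parse_config_spec_alt
  exact pcs_fuse default_nb (pcsSplit spec_str) [] []
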